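-- pv_equiv track=rewrite | github.com/misaka0502/LIBERO | scripts/vis_pcd_data.py | _pick_npz_candidate
-- ===== SOURCE A (Python) =====
-- def _pick_npz_candidate(name, candidates):
--     if not candidates:
--         return None
--     basename = str(name or '').lower()
--     preferred_tags = []
--     if 'combined' in basename:
--         preferred_tags.append('libero_merge')
--     preferred_tags.extend(['libero_repair', 'libero_ch', 'libero', 'libero_norm'])
--     lowered = [str(c).lower() for c in candidates]
--     for tag in preferred_tags:
--         for cand, low in zip(candidates, lowered):
--             if f'/{tag}/' in low:
--                 return cand
--     return sorted(candidates)[0]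
-- ===== SOURCE B (Python) =====
-- def _pick_npz_candidate(name, candidates):
--     if not candidates:
--         return None
--     basename = str(name or '').lower()
--     preferred_tags = (['libero_merge'] if 'combined' in basename else []) + \
--         ['libero_repair', 'libero_ch', 'libero', 'libero_norm']
--     sentinel = len(preferred_tags)
--     best_cand, best_key = None, sentinel
--     for c in candidates:
--         low = str(c).lower()
--         k = next((i for i, t in enumerate(preferred_tags) if f'/{t}/' in low), sentinel)
--         if k < best_key:
--             best_cand, best_key = c, k
--     if best_cand is None:
--         return sorted(candidates)[0]
--     return best_cand
-- ===== Notes on version B (the rewrite author's own statement) =====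
-- stated objective: alternative
-- what changed: A's tag-outer/candidate-inner nested early-return loops are replaced by a single pass over the candidates that computes each candidate's first-matching-tag index and keeps the running best (candidate, key) pair under strict improvement, falling back to sorted(candidates)[0] when nothing matched.
import Mathlib
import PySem

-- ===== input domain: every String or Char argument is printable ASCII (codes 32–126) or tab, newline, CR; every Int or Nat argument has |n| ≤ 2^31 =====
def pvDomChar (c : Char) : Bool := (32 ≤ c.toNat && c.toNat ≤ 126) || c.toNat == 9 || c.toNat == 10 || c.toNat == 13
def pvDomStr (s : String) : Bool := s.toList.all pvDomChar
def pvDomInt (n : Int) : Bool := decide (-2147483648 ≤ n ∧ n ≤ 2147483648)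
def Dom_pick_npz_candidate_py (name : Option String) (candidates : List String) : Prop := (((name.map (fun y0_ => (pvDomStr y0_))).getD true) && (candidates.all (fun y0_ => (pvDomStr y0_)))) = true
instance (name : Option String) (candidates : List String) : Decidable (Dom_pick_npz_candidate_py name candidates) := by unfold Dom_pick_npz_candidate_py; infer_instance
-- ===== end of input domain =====

-- B replaces A's tag-outer/candidate-inner double loop by a single pass over the
-- candidates that keeps the running best (candidate, first-matching-tag-index) pair;
-- objective: alternative decomposition of the same cost.

-- ===== PORT A =====
-- inner 'for cand, low in zip(...)' loop for one tag (early return = Option)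
def pyInnerA (tag : String) : List (String × String) → Option String
  | [] => none
  | (cand, low) :: rest =>
    if PySem.Str.isIn ("/" ++ tag ++ "/") low then some cand else pyInnerA tag rest

-- outer 'for tag in preferred_tags' loop
def pyOuterA (pairs : List (String × String)) : List String → Option String
  | [] => none
  | tag :: rest =>
    match pyInnerA tag pairs with
    | some c => some c
    | none => pyOuterA pairs rest

def pick_npz_candidate_py (name : Option String) (candidates : List String) : Option String :=
  if candidates = [] then none
  else
    let basename := PySem.Str.lower (name.getD "")
    let preferred_tags :=
      (if PySem.Str.isIn "combined" basename then ["libero_merge"] else []) ++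
        ["libero_repair", "libero_ch", "libero", "libero_norm"]
    let lowered := candidates.map PySem.Str.lower
    match pyOuterA (candidates.zip lowered) preferred_tags with
    | some c => some c
    | none => PySem.List.pyGet? (PySem.List.sorted candidates (fun x => x) false) 0

-- ===== PORT B =====
-- next((i for i, t in enumerate(tags) if f'/{t}/' in low), len(tags))
def tagKey : List String → String → Nat
  | [], _ => 0
  | t :: rest, low =>
    if PySem.Str.isIn ("/" ++ t ++ "/") low then 0 else 1 + tagKey rest low

-- 'for c in candidates' loop carrying (best_cand, best_key)
def scanB (tags : List String) : List String → (Option String × Nat) → (Option String × Nat)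
  | [], acc => acc
  | c :: rest, (bc, bk) =>
    let k := tagKey tags (PySem.Str.lower c)
    scanB tags rest (if k < bk then (some c, k) else (bc, bk))

def pick_npz_candidate_py_alt (name : Option String) (candidates : List String) : Option String :=
  if candidates = [] then none
  else
    let basename := PySem.Str.lower (name.getD "")
    let preferred_tags :=
      (if PySem.Str.isIn "combined" basename then ["libero_merge"] else []) ++
        ["libero_repair", "libero_ch", "libero", "libero_norm"]
    match (scanB preferred_tags candidates (none, preferred_tags.length)).1 with
    | none => PySem.List.pyGet? (PySem.List.sorted candidates (fun x => x) false) 0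
    | some c => some c

-- ===== PRECONDITION & SPEC =====
def Spec_pick_npz_candidate_py (name : Option String) (candidates : List String) (out : Option String) : Prop := out = pick_npz_candidate_py_alt name candidates
instance (name : Option String) (candidates : List String) (out : Option String) : Decidable (Spec_pick_npz_candidate_py name candidates out) := by unfold Spec_pick_npz_candidate_py; infer_instance

-- ===== CLAIM (what is proved, stated in full; the proofs are below) =====
def Claim_equal_pick_npz_candidate_py : Prop := ∀ (name : Option String) (candidates : List String), Dom_pick_npz_candidate_py name candidates → Spec_pick_npz_candidate_py name candidates (pick_npz_candidate_py name candidates)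

-- ===== LEMMAS AND PROOFS =====

-- a scan whose bound is 0 never updates
theorem scanB_zero (tags : List String) (cands : List String) (acc : Option String) :
    scanB tags cands (acc, 0) = (acc, 0) := by
  induction cands with
  | nil => rfl
  | cons c rest ih => simp [scanB, ih]

-- if some candidate has key 0, the scan ends on the leftmost such candidate
theorem scanB_find_zero (tags : List String) (cands : List String) (c0 : String)
    (h : cands.find? (fun c => tagKey tags (PySem.Str.lower c) == 0) = some c0)
    (bc : Option String) (bk : Nat) (hbk : 0 < bk) :
    scanB tags cands (bc, bk) = (some c0, 0) := by
  induction cands generalizing bc bk with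
  | nil => simp at h
  | cons c rest ih =>
    by_cases hc : tagKey tags (PySem.Str.lower c) = 0
    · rw [List.find?_cons_of_pos (by simp [hc])] at h
      have hc0 : c = c0 := by simpa using h
      subst hc0
      simp only [scanB, hc]
      rw [if_pos hbk, scanB_zero]
    · rw [List.find?_cons_of_neg (by simp [hc])] at h
      simp only [scanB]
      split_ifs with hlt
      · exact ih h _ _ (Nat.pos_of_ne_zero hc)
      · exact ih h _ _ hbk

-- if no candidate matches tag t, the scan over (t :: ts) is the scan over ts shifted by one
theorem scanB_shift (t : String) (ts : List String) (cands : List String)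
    (h : ∀ c ∈ cands, PySem.Str.isIn ("/" ++ t ++ "/") (PySem.Str.lower c) = false)
    (bc : Option String) (bk : Nat) :
    scanB (t :: ts) cands (bc, bk + 1) =
      ((scanB ts cands (bc, bk)).1, (scanB ts cands (bc, bk)).2 + 1) := by
  induction cands generalizing bc bk with
  | nil => rfl
  | cons c rest ih =>
    have hc := h c (by simp)
    have hk : tagKey (t :: ts) (PySem.Str.lower c) = tagKey ts (PySem.Str.lower c) + 1 := by
      simp only [tagKey, hc]
      simp [Nat.add_comm]
    have hrest : ∀ c' ∈ rest, PySem.Str.isIn ("/" ++ t ++ "/") (PySem.Str.lower c') = false :=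
      fun c' hm => h c' (by simp [hm])
    simp only [scanB, hk]
    by_cases hlt : tagKey ts (PySem.Str.lower c) < bk
    · rw [if_pos (by omega : tagKey ts (PySem.Str.lower c) + 1 < bk + 1), if_pos hlt]
      exact ih hrest (some c) (tagKey ts (PySem.Str.lower c))
    · rw [if_neg (by omega : ¬ (tagKey ts (PySem.Str.lower c) + 1 < bk + 1)), if_neg hlt]
      exact ih hrest bc bk

-- the inner for-loop is find? over the candidates
theorem pyInnerA_eq_find (t : String) (cands : List String) :
    pyInnerA t (cands.zip (cands.map PySem.Str.lower)) =
      cands.find? (fun c => PySem.Str.isIn ("/" ++ t ++ "/") (PySem.Str.lower c)) := by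
  induction cands with
  | nil => rfl
  | cons c rest ih =>
    simp only [List.zip] at ih ⊢
    cases hc : PySem.Str.isIn ("/" ++ t ++ "/") (PySem.Str.lower c) with
    | true => simp only [List.zipWith, List.map, pyInnerA, List.find?, hc]; simp
    | false => simp only [List.zipWith, List.map, pyInnerA, List.find?, hc]; simp [ih]

-- main bridge: single keyed scan = nested tag loops
theorem scanB_eq_pyOuterA (tags : List String) (cands : List String) :
    (scanB tags cands (none, tags.length)).1 =
      pyOuterA (cands.zip (cands.map PySem.Str.lower)) tags := by
  induction tags with
  | nil =>
    have : scanB [] cands (none, 0) = (none, 0) := by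
      induction cands with
      | nil => rfl
      | cons c rest ih => simpa [scanB, tagKey] using ih
    simp [this, pyOuterA]
  | cons t ts ih =>
    rw [pyOuterA, pyInnerA_eq_find]
    cases hf : cands.find? (fun c => PySem.Str.isIn ("/" ++ t ++ "/") (PySem.Str.lower c)) with
    | some c0 =>
      have hpred : (fun c => tagKey (t :: ts) (PySem.Str.lower c) == 0) =
          (fun c => PySem.Str.isIn ("/" ++ t ++ "/") (PySem.Str.lower c)) := by
        funext c
        cases hc : PySem.Str.isIn ("/" ++ t ++ "/") (PySem.Str.lower c) <;>
          simp only [tagKey, hc] <;> simp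
      have hf' : cands.find? (fun c => tagKey (t :: ts) (PySem.Str.lower c) == 0) = some c0 := by
        rw [hpred]; exact hf
      rw [scanB_find_zero (t :: ts) cands c0 hf' none (t :: ts).length (by simp)]
    | none =>
      have hnone : ∀ c ∈ cands, PySem.Str.isIn ("/" ++ t ++ "/") (PySem.Str.lower c) = false := by
        intro c hc
        have := List.find?_eq_none.mp hf c hc
        simpa using this
      have : (t :: ts).length = ts.length + 1 := by simp
      rw [this, scanB_shift t ts cands hnone none ts.length]
      simpa using ih

-- ===== VERDICT (by name: the statement is the Claim_ definition above) =====
theorem pick_npz_candidate_py_spec : Claim_equal_pick_npz_candidate_py := by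
  intro name candidates _
  unfold Spec_pick_npz_candidate_py
  unfold pick_npz_candidate_py pick_npz_candidate_py_alt
  by_cases hnil : candidates = []
  · simp [hnil]
  · rw [if_neg hnil, if_neg hnil]
    simp only [scanB_eq_pyOuterA]
    cases pyOuterA (candidates.zip (candidates.map PySem.Str.lower)) _ <;> rfl
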